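-- pv_equiv track=rewrite | github.com/nardogod/rag3det | scripts/categorizar_vantagens.py | categorizar_item
-- ===== SOURCE A (Python) =====
-- def _normalizar(nome: str) -> str:
--     import unicodedata
--     n = unicodedata.normalize("NFD", nome.lower())
--     return "".join(c for c in n if unicodedata.category(c) != "Mn")
--
-- def categorizar_item(nome: str, tipo: str, tax: dict) -> str:
--     """Retorna o id da categoria."""
--     nome_limpo = nome.strip()
--     if not nome_limpo:
--         return "desconhecido"
--     nome_norm = _normalizar(nome_limpo)
--
--     cats = tax["categorias"]
--     ordem = tax.get("ordem_categorias", [])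
--
--     # Kits: padrões específicos
--     for padrao in cats.get("kit_personagem", {}).get("padroes", []):
--         p_norm = _normalizar(padrao)
--         if p_norm in nome_norm or nome_norm.startswith(p_norm):
--             return "kit_personagem"
--
--     # Vantagem mágica: padrões
--     for padrao in cats.get("vantagem_magia", {}).get("padroes", []):
--         p_norm = _normalizar(padrao)
--         if p_norm in nome_norm or nome_norm.startswith(p_norm):
--             return "vantagem_magia"
--
--     # Vantagem raça: prefixos
--     for prefixo in cats.get("vantagem_raca", {}).get("prefixos", []):
--         if nome_norm.startswith(_normalizar(prefixo)):
--             return "vantagem_raca"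
--
--     # Desvantagem mágica
--     for padrao in cats.get("desvantagem_magia", {}).get("padroes", []):
--         if _normalizar(padrao) in nome_norm:
--             return "desvantagem_magia"
--
--     # Por tipo
--     if tipo == "desvantagem":
--         return "desvantagem_geral"
--     return "vantagem_magia"  # fallback para vantagens não mapeadas
-- ===== SOURCE B (Python) =====
-- def _normalizar(nome: str) -> str:
--     import unicodedata
--     n = unicodedata.normalize("NFD", nome.lower())
--     return "".join(c for c in n if unicodedata.category(c) != "Mn")
--
-- # Inverted matching: instead of scanning each pattern through the name with
-- # `in`/`startswith`, build a hash set of the normalized patterns (plus the set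
-- # of their lengths) and scan the NAME's positions, looking each window up in
-- # the set — multi-pattern matching by length classes.
-- def _match(nome_norm: str, patterns, prefix_only: bool) -> bool:
--     pats = {_normalizar(p) for p in patterns}
--     lens = {len(p) for p in pats}
--     if prefix_only:
--         return any(nome_norm[:L] in pats for L in lens)
--     n = len(nome_norm)
--     return any(nome_norm[i:i + L] in pats
--                for L in lens for i in range(n - L + 1))
--
-- def categorizar_item(nome: str, tipo: str, tax: dict) -> str:
--     """Retorna o id da categoria."""
--     nome_limpo = nome.strip()
--     if not nome_limpo:
--         return "desconhecido"
--     nome_norm = _normalizar(nome_limpo)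
--     cats = tax["categorias"]
--     if _match(nome_norm, cats.get("kit_personagem", {}).get("padroes", []), False):
--         return "kit_personagem"
--     if _match(nome_norm, cats.get("vantagem_magia", {}).get("padroes", []), False):
--         return "vantagem_magia"
--     if _match(nome_norm, cats.get("vantagem_raca", {}).get("prefixos", []), True):
--         return "vantagem_raca"
--     if _match(nome_norm, cats.get("desvantagem_magia", {}).get("padroes", []), False):
--         return "desvantagem_magia"
--     return "desvantagem_geral" if tipo == "desvantagem" else "vantagem_magia"
-- ===== Notes on version B (the rewrite author's own statement) =====
-- stated objective: alternative
-- what changed: Inverts the matching: instead of scanning each pattern through the name with `in`/`startswith`, B builds a hash set of the normalized patterns (and of their lengths) per category and slides over the name's windows/prefixes, testing each window by a set lookup (multi-pattern matching by length classes).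
import Mathlib
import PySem

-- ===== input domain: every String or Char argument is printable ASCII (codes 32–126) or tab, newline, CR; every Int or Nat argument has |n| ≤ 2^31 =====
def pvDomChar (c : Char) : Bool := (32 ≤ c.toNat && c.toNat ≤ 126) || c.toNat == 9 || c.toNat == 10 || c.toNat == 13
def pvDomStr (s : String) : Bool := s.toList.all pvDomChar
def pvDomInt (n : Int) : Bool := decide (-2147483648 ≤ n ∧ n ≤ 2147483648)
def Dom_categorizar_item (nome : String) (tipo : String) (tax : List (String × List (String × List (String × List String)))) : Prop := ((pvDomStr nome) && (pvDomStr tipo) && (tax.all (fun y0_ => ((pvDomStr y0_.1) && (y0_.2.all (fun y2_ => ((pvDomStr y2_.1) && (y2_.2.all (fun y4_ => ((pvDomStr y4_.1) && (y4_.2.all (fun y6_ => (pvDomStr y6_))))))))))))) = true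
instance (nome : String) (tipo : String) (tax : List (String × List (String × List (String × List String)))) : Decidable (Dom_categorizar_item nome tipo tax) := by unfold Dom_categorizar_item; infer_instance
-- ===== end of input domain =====

-- B inverts the matching: instead of scanning each pattern through the name with
-- `in`/`startswith`, it builds a hash set of the normalized patterns (and of their
-- lengths) per category and scans the NAME's windows/prefixes, looking each one up
-- in the set (objective: alternative; same result, a different algorithm).


-- ===== PORT A =====
-- _normalizar = NFD + drop combining marks after .lower(); on the printable-ASCII
-- domain NFD is the identity and no Mn characters occur, so it is exactly .lower().
def pvNorm (s : String) : String := PySem.Str.lower s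

def categorizar_item (nome : String) (tipo : String) (tax : List (String × List (String × List (String × List String)))) : String :=
  let nome_limpo := PySem.Str.strip nome
  if nome_limpo = "" then "desconhecido" else
  let nome_norm := pvNorm nome_limpo
  -- tax["categorias"]: raises KeyError when absent — excluded by Pre_; getD is exact on Pre_
  let cats : List (String × List (String × List String)) := PySem.Dict.getD (PySem.Dict.mk tax) "categorias" []
  if (PySem.Dict.getD (PySem.Dict.mk (PySem.Dict.getD (PySem.Dict.mk cats) "kit_personagem" [])) "padroes" []).any
       (fun p => PySem.Str.isIn (pvNorm p) nome_norm || PySem.Str.startswith nome_norm (pvNorm p))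
  then "kit_personagem"
  else if (PySem.Dict.getD (PySem.Dict.mk (PySem.Dict.getD (PySem.Dict.mk cats) "vantagem_magia" [])) "padroes" []).any
       (fun p => PySem.Str.isIn (pvNorm p) nome_norm || PySem.Str.startswith nome_norm (pvNorm p))
  then "vantagem_magia"
  else if (PySem.Dict.getD (PySem.Dict.mk (PySem.Dict.getD (PySem.Dict.mk cats) "vantagem_raca" [])) "prefixos" []).any
       (fun p => PySem.Str.startswith nome_norm (pvNorm p))
  then "vantagem_raca"
  else if (PySem.Dict.getD (PySem.Dict.mk (PySem.Dict.getD (PySem.Dict.mk cats) "desvantagem_magia" [])) "padroes" []).any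
       (fun p => PySem.Str.isIn (pvNorm p) nome_norm)
  then "desvantagem_magia"
  else if tipo = "desvantagem" then "desvantagem_geral" else "vantagem_magia"

-- ===== PORT B =====
-- Source B's _match: a set of normalized patterns and a set of their lengths; scan
-- the name's prefixes (prefix mode) or windows nome_norm[i:i+L] (substring mode),
-- each tested by a set lookup.
def pvMatch (nome_norm : String) (patterns : List String) (prefixOnly : Bool) : Bool :=
  let pats : PySem.Set String := PySem.Set.ofList (patterns.map pvNorm)
  let lens : PySem.Set Int := PySem.Set.ofList (pats.map PySem.Str.len)
  if prefixOnly then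
    lens.any (fun L => pats.contains (PySem.Str.slice nome_norm none (some L)))
  else
    let n := PySem.Str.len nome_norm
    lens.any (fun L => (PySem.List.pyRange 0 (n - L + 1) 1).any
      (fun i => pats.contains (PySem.Str.slice nome_norm (some i) (some (i + L)))))

def categorizar_item_alt (nome : String) (tipo : String) (tax : List (String × List (String × List (String × List String)))) : String :=
  let nome_limpo := PySem.Str.strip nome
  if nome_limpo = "" then "desconhecido" else
  let nome_norm := pvNorm nome_limpo
  let cats : List (String × List (String × List String)) := PySem.Dict.getD (PySem.Dict.mk tax) "categorias" []
  if pvMatch nome_norm (PySem.Dict.getD (PySem.Dict.mk (PySem.Dict.getD (PySem.Dict.mk cats) "kit_personagem" [])) "padroes" []) false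
  then "kit_personagem"
  else if pvMatch nome_norm (PySem.Dict.getD (PySem.Dict.mk (PySem.Dict.getD (PySem.Dict.mk cats) "vantagem_magia" [])) "padroes" []) false
  then "vantagem_magia"
  else if pvMatch nome_norm (PySem.Dict.getD (PySem.Dict.mk (PySem.Dict.getD (PySem.Dict.mk cats) "vantagem_raca" [])) "prefixos" []) true
  then "vantagem_raca"
  else if pvMatch nome_norm (PySem.Dict.getD (PySem.Dict.mk (PySem.Dict.getD (PySem.Dict.mk cats) "desvantagem_magia" [])) "padroes" []) false
  then "desvantagem_magia"
  else if tipo = "desvantagem" then "desvantagem_geral" else "vantagem_magia"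

-- ===== PRECONDITION & SPEC =====
-- Pre_ excludes exactly the inputs where tax["categorias"] raises KeyError
-- (that lookup is reached only when the stripped name is non-empty).
def Pre_categorizar_item (nome : String) (tipo : String) (tax : List (String × List (String × List (String × List String)))) : Prop :=
  PySem.Str.strip nome = "" ∨ PySem.Dict.contains (PySem.Dict.mk tax) "categorias" = true
instance (nome : String) (tipo : String) (tax : List (String × List (String × List (String × List String)))) : Decidable (Pre_categorizar_item nome tipo tax) := by unfold Pre_categorizar_item; infer_instance

def pvWitness_categorizar_item : String × String × (List (String × List (String × List (String × List String)))) :=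
  ("Kit Mago", "vantagem", [("categorias", [("kit_personagem", [("padroes", ["kit"])])])])

def Spec_categorizar_item (nome : String) (tipo : String) (tax : List (String × List (String × List (String × List String)))) (out : String) : Prop := out = categorizar_item_alt nome tipo tax
instance (nome : String) (tipo : String) (tax : List (String × List (String × List (String × List String)))) (out : String) : Decidable (Spec_categorizar_item nome tipo tax out) := by unfold Spec_categorizar_item; infer_instance

-- ===== CLAIM =====
def Claim_equal_categorizar_item : Prop := ∀ (nome : String) (tipo : String) (tax : List (String × List (String × List (String × List String)))), Dom_categorizar_item nome tipo tax → Pre_categorizar_item nome tipo tax → Spec_categorizar_item nome tipo tax (categorizar_item nome tipo tax)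

-- ===== LEMMAS AND PROOFS =====

theorem pv_slice_toList (s : String) (a b : Option Int) :
    (PySem.Str.slice s a b).toList = PySem.List.slice s.toList a b := by
  simp [PySem.Str.slice, PySem.Chars.slice]

theorem pv_drop_take_infix (l : List Char) (i k : Nat) : (l.drop i).take k <:+: l :=
  ((l.drop i).take_prefix k).isInfix.trans (l.drop_suffix i).isInfix

theorem pv_infix_window (q l : List Char) (h : q <:+: l) :
    ∃ i : Nat, i + q.length ≤ l.length ∧ (l.drop i).take q.length = q := by
  obtain ⟨s, t, rfl⟩ := h
  refine ⟨s.length, by simp, ?_⟩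
  rw [List.append_assoc, List.drop_left, List.take_left]


theorem pv_match_sub (nn : String) (ps : List String) :
    pvMatch nn ps false = ps.any (fun p => PySem.Str.isIn (pvNorm p) nn) := by
  rw [Bool.eq_iff_iff]
  simp only [pvMatch, Bool.false_eq_true, if_false, List.any_eq_true, PySem.Set.contains_iff,
    PySem.Set.mem_ofList, List.mem_map, PySem.List.mem_pyRange_one, PySem.Str.isIn_iff_infix]
  constructor
  · rintro ⟨L, ⟨x, ⟨p0, hp0, rfl⟩, rfl⟩, i, ⟨h0, hi⟩, p, hp, hslice⟩
    refine ⟨p, hp, ?_⟩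
    rw [hslice, pv_slice_toList,
      PySem.List.slice_toNat _ h0 (by have := PySem.Str.len_eq (pvNorm p0); omega)]
    exact pv_drop_take_infix _ _ _
  · rintro ⟨p, hp, hinf⟩
    obtain ⟨i, hle, hwin⟩ := pv_infix_window _ _ hinf
    refine ⟨PySem.Str.len (pvNorm p), ⟨pvNorm p, ⟨p, hp, rfl⟩, rfl⟩, (i : Int),
      ⟨Int.natCast_nonneg i, by rw [PySem.Str.len_eq, PySem.Str.len_eq]; omega⟩,
      p, hp, ?_⟩
    apply String.toList_inj.mp
    rw [pv_slice_toList, PySem.Str.len_eq,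
      show ((i:Int) + ((pvNorm p).toList.length : Int)) = (((i + (pvNorm p).toList.length : Nat)) : Int) by push_cast; ring,
      PySem.List.slice_natCast]
    simpa using hwin.symm

theorem pv_match_pre (nn : String) (ps : List String) :
    pvMatch nn ps true = ps.any (fun p => PySem.Str.startswith nn (pvNorm p)) := by
  rw [Bool.eq_iff_iff]
  simp only [pvMatch, if_true, List.any_eq_true, PySem.Set.contains_iff,
    PySem.Set.mem_ofList, List.mem_map, PySem.Str.startswith_eq]
  constructor
  · rintro ⟨L, ⟨x, ⟨p0, hp0, rfl⟩, rfl⟩, p, hp, hslice⟩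
    refine ⟨p, hp, ?_⟩
    rw [PySem.Chars.startswith_iff, hslice, pv_slice_toList,
      PySem.List.slice_to _ (by rw [PySem.Str.len_eq]; positivity)]
    exact nn.toList.take_prefix _
  · rintro ⟨p, hp, hpre⟩
    rw [PySem.Chars.startswith_iff] at hpre
    refine ⟨PySem.Str.len (pvNorm p), ⟨pvNorm p, ⟨p, hp, rfl⟩, rfl⟩, p, hp, ?_⟩
    apply String.toList_inj.mp
    rw [pv_slice_toList, PySem.Str.len_eq, PySem.List.slice_to _ (by positivity)]
    simp only [Int.toNat_natCast]
    exact List.prefix_iff_eq_take.mp hpre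

-- `p in s or s.startswith(p)` is `p in s`: a prefix is in particular an infix.
theorem pv_or_collapse (nn pn : String) :
    (PySem.Str.isIn pn nn || PySem.Str.startswith nn pn) = PySem.Str.isIn pn nn := by
  cases h : PySem.Str.startswith nn pn
  · rw [Bool.or_false]
  · have hin : PySem.Str.isIn pn nn = true := by
      rw [PySem.Str.isIn_iff_infix]
      have := (PySem.Chars.startswith_iff nn.toList pn.toList).mp (by simpa using h)
      exact this.isInfix
    rw [Bool.or_true, hin]

-- ===== VERDICT =====
theorem categorizar_item_spec : Claim_equal_categorizar_item := by
  intro nome tipo tax _ _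
  unfold Spec_categorizar_item categorizar_item categorizar_item_alt
  simp only [pv_match_sub, pv_match_pre, pv_or_collapse]
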